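-- pv_equiv track=rewrite | github.com/tellomanuel/clavesscout | app.py | text_to_murcielago
-- ===== SOURCE A (Python) =====
-- murcielago_dict = {
--     'M': '0',
--     'U': '1',
--     'R': '2',
--     'C': '3',
--     'I': '4',
--     'E': '5',
--     'L': '6',
--     'A': '7',
--     'G': '8',
--     'O': '9',
--     ' ': '/',
-- }
--
-- def text_to_murcielago(text_to_encode):
--     text_encoded = ''
--     for char in text_to_encode:
--         if char.upper() in murcielago_dict:
--             text_encoded += murcielago_dict[char.upper()]
--         else:
--             text_encoded += char.upper()
--     return text_encoded
-- ===== SOURCE B (Python) =====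
-- murcielago_dict = {
--     'M': '0',
--     'U': '1',
--     'R': '2',
--     'C': '3',
--     'I': '4',
--     'E': '5',
--     'L': '6',
--     'A': '7',
--     'G': '8',
--     'O': '9',
--     ' ': '/',
-- }
--
-- def text_to_murcielago(text_to_encode):
--     # Uppercase once, then apply one whole-string replace pass per cipher pair.
--     # Correct because no replacement value ('0'-'9', '/') is itself a key,
--     # so later passes never touch characters substituted by earlier ones.
--     text = text_to_encode.upper()
--     for letter, digit in murcielago_dict.items():
--         text = text.replace(letter, digit)
--     return text
-- ===== Notes on version B (the rewrite author's own statement) =====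
-- stated objective: faster
-- what changed: Instead of one Python-level loop over characters with a dict lookup, branch and string concatenation per character, B uppercases the whole string once and then performs eleven staged whole-string str.replace passes, one per cipher pair; correctness rests on the fact that no replacement value is itself a key.
import Mathlib
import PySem

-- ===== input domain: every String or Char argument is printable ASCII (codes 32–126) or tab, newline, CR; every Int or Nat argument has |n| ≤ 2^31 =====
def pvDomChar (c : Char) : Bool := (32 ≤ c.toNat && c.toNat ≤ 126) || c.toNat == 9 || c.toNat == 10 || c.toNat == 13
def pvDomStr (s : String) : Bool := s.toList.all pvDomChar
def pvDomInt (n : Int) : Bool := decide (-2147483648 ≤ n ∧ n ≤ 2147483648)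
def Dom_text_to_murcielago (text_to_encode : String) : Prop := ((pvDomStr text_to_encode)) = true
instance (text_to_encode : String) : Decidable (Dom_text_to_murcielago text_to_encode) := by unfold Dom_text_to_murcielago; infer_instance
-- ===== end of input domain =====

-- B replaces A's single per-character loop (dict lookup + branch, string concatenation)
-- by one upper() pass followed by eleven staged whole-string replace passes, one per
-- cipher pair (alternative decomposition; values are never keys, so passes cannot clash).

-- ===== PORT A =====
-- the module-level dict murcielago_dict
def murcielagoDict : PySem.Dict Char String :=
  PySem.Dict.ofList [('M', "0"), ('U', "1"), ('R', "2"), ('C', "3"), ('I', "4"),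
    ('E', "5"), ('L', "6"), ('A', "7"), ('G', "8"), ('O', "9"), (' ', "/")]

-- loop: for char in text: if char.upper() in dict: acc += dict[char.upper()] else: acc += char.upper()
def text_to_murcielago (text_to_encode : String) : String :=
  String.ofList <| text_to_encode.toList.foldl
    (fun acc c =>
      let u := PySem.Chars.upperChar c
      match murcielagoDict.get? u with
      | some v => acc ++ v.toList
      | none => acc ++ [u]) []

-- ===== PORT B =====
-- the same dict, keys/values as single-character strings for the replace passes
def murcielagoDictB : PySem.Dict String String :=
  PySem.Dict.ofList [("M", "0"), ("U", "1"), ("R", "2"), ("C", "3"), ("I", "4"),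
    ("E", "5"), ("L", "6"), ("A", "7"), ("G", "8"), ("O", "9"), (" ", "/")]

-- text = text.upper(); for letter, digit in dict.items(): text = text.replace(letter, digit)
def text_to_murcielago_alt (text_to_encode : String) : String :=
  murcielagoDictB.items.foldl
    (fun text p => PySem.Str.replace text p.1 p.2)
    (PySem.Str.upper text_to_encode)

-- ===== PRECONDITION & SPEC =====
def Spec_text_to_murcielago (text_to_encode : String) (out : String) : Prop := out = text_to_murcielago_alt text_to_encode
instance (text_to_encode : String) (out : String) : Decidable (Spec_text_to_murcielago text_to_encode out) := by unfold Spec_text_to_murcielago; infer_instance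

-- ===== CLAIM (what is proved, stated in full; the proofs are below) =====
def Claim_equal_text_to_murcielago : Prop := ∀ (text_to_encode : String), Dom_text_to_murcielago text_to_encode → Spec_text_to_murcielago text_to_encode (text_to_murcielago text_to_encode)

-- ===== LEMMAS AND PROOFS =====

-- one single-character substitution, as a pointwise function
def pvSub (k v c : Char) : Char := if c = k then v else c

-- the eleven substitutions of B's passes, composed in pass order (M first, space last)
def pvChain (c : Char) : Char :=
  pvSub ' ' '/' (pvSub 'O' '9' (pvSub 'G' '8' (pvSub 'A' '7' (pvSub 'L' '6'
    (pvSub 'E' '5' (pvSub 'I' '4' (pvSub 'C' '3' (pvSub 'R' '2'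
      (pvSub 'U' '1' (pvSub 'M' '0' c))))))))))

-- single-character replace is a pointwise map (shown on the fuelled worker)
theorem pv_replace_go_single (k v : Char) :
    ∀ (fuel : Nat) (l acc : List Char), l.length ≤ fuel →
      PySem.Chars.replace.go [k] [v] fuel l acc =
        acc.reverse ++ l.map (pvSub k v) := by
  intro fuel
  induction fuel with
  | zero =>
    intro l acc h
    have : l = [] := List.length_eq_zero_iff.mp (Nat.le_zero.mp h)
    subst this
    simp [PySem.Chars.replace.go]
  | succ n ih =>
    intro l acc h
    cases l with
    | nil => simp [PySem.Chars.replace.go]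
    | cons c t =>
      simp only [List.length_cons, Nat.succ_le_succ_iff] at h
      by_cases hc : k = c
      · subst hc
        have hpre : List.isPrefixOf [k] (k :: t) = true := by
          simp [List.isPrefixOf]
        simp only [PySem.Chars.replace.go, hpre, if_true]
        rw [ih _ _ (by simpa using h)]
        simp [pvSub]
      · have hpre : List.isPrefixOf [k] (c :: t) = false := by
          simp [List.isPrefixOf, hc]
        simp only [PySem.Chars.replace.go, hpre]
        rw [ih _ _ h]
        have hne : c ≠ k := fun he => hc he.symm
        simp [pvSub, hne]

theorem pv_replace_single (k v : Char) (l : List Char) :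
    PySem.Chars.replace l [k] [v] = l.map (pvSub k v) := by
  simp only [PySem.Chars.replace, List.isEmpty_cons]
  rw [if_neg (by simp), pv_replace_go_single k v l.length l [] (le_refl _)]
  simp

-- per character, A's dict branch is exactly the singleton of B's composed substitution
theorem pv_point (u : Char) :
    (match murcielagoDict.get? u with
      | some v => v.toList
      | none => [u]) = [pvChain u] := by
  have hd : murcielagoDict = PySem.Dict.mk [('M', "0"), ('U', "1"), ('R', "2"), ('C', "3"),
      ('I', "4"), ('E', "5"), ('L', "6"), ('A', "7"), ('G', "8"), ('O', "9"), (' ', "/")] := by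
    decide
  simp only [hd, PySem.Dict.get?_mk_cons, beq_iff_eq, pvChain, pvSub]
  by_cases h1 : u = 'M'
  · subst h1; decide
  rw [if_neg (fun h => h1 h.symm), if_neg h1]
  by_cases h2 : u = 'U'
  · subst h2; decide
  rw [if_neg (fun h => h2 h.symm), if_neg h2]
  by_cases h3 : u = 'R'
  · subst h3; decide
  rw [if_neg (fun h => h3 h.symm), if_neg h3]
  by_cases h4 : u = 'C'
  · subst h4; decide
  rw [if_neg (fun h => h4 h.symm), if_neg h4]
  by_cases h5 : u = 'I'
  · subst h5; decide
  rw [if_neg (fun h => h5 h.symm), if_neg h5]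
  by_cases h6 : u = 'E'
  · subst h6; decide
  rw [if_neg (fun h => h6 h.symm), if_neg h6]
  by_cases h7 : u = 'L'
  · subst h7; decide
  rw [if_neg (fun h => h7 h.symm), if_neg h7]
  by_cases h8 : u = 'A'
  · subst h8; decide
  rw [if_neg (fun h => h8 h.symm), if_neg h8]
  by_cases h9 : u = 'G'
  · subst h9; decide
  rw [if_neg (fun h => h9 h.symm), if_neg h9]
  by_cases h10 : u = 'O'
  · subst h10; decide
  rw [if_neg (fun h => h10 h.symm), if_neg h10]
  by_cases h11 : u = ' '
  · subst h11; decide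
  rw [if_neg (fun h => h11 h.symm), if_neg h11]
  simp [PySem.Dict.get?]

-- A's foldl accumulates exactly the per-character branch values
theorem pv_foldl_eq (l : List Char) (acc : List Char) :
    l.foldl (fun acc c =>
      let u := PySem.Chars.upperChar c
      match murcielagoDict.get? u with
      | some v => acc ++ v.toList
      | none => acc ++ [u]) acc =
    acc ++ l.flatMap (fun c =>
      match murcielagoDict.get? (PySem.Chars.upperChar c) with
      | some v => v.toList
      | none => [PySem.Chars.upperChar c]) := by
  induction l generalizing acc with
  | nil => simp
  | cons c rest ih =>
    simp only [List.foldl, List.flatMap_cons]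
    rw [ih]
    cases hm : murcielagoDict.get? (PySem.Chars.upperChar c) with
    | some v => simp
    | none => simp

-- ===== VERDICT (by name: the statement is the Claim_ definition above) =====
set_option maxHeartbeats 1000000 in
theorem text_to_murcielago_spec : Claim_equal_text_to_murcielago := by
  intro s _
  unfold Spec_text_to_murcielago text_to_murcielago text_to_murcielago_alt
  have hitems : murcielagoDictB.items = [("M", "0"), ("U", "1"), ("R", "2"), ("C", "3"),
      ("I", "4"), ("E", "5"), ("L", "6"), ("A", "7"), ("G", "8"), ("O", "9"), (" ", "/")] := by
    decide
  rw [hitems]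
  simp only [List.foldl]
  rw [← String.toList_inj]
  simp only [PySem.Str.toList_replace, PySem.Str.toList_upper, String.toList_ofList]
  rw [pv_foldl_eq]
  simp only [List.nil_append, PySem.Chars.upper]
  simp only [show ("M" : String).toList = ['M'] from rfl, show ("0" : String).toList = ['0'] from rfl, show ("U" : String).toList = ['U'] from rfl, show ("1" : String).toList = ['1'] from rfl, show ("R" : String).toList = ['R'] from rfl, show ("2" : String).toList = ['2'] from rfl, show ("C" : String).toList = ['C'] from rfl, show ("3" : String).toList = ['3'] from rfl, show ("I" : String).toList = ['I'] from rfl, show ("4" : String).toList = ['4'] from rfl, show ("E" : String).toList = ['E'] from rfl, show ("5" : String).toList = ['5'] from rfl, show ("L" : String).toList = ['L'] from rfl, show ("6" : String).toList = ['6'] from rfl, show ("A" : String).toList = ['A'] from rfl, show ("7" : String).toList = ['7'] from rfl, show ("G" : String).toList = ['G'] from rfl, show ("8" : String).toList = ['8'] from rfl, show ("O" : String).toList = ['O'] from rfl, show ("9" : String).toList = ['9'] from rfl, show (" " : String).toList = [' '] from rfl, show ("/" : String).toList = ['/'] from rfl]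
  rw [pv_replace_single, pv_replace_single, pv_replace_single, pv_replace_single,
    pv_replace_single, pv_replace_single, pv_replace_single, pv_replace_single,
    pv_replace_single, pv_replace_single, pv_replace_single]
  simp only [List.map_map]
  have hpt : (fun c =>
      match murcielagoDict.get? (PySem.Chars.upperChar c) with
      | some v => v.toList
      | none => [PySem.Chars.upperChar c]) =
      (fun c => [pvChain (PySem.Chars.upperChar c)]) := by
    funext c; exact pv_point (PySem.Chars.upperChar c)
  rw [hpt]
  have hfm : ∀ (f : Char → Char) (l : List Char), l.flatMap (fun c => [f c]) = l.map f := by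
    intro f l; induction l with
    | nil => rfl
    | cons a t ih => simp [ih]
  rw [hfm]
  simp only [Function.comp_def]
  rfl
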